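-- pv_equiv track=rewrite | github.com/Jaybee87/pokemon-showdown-bot | live_challenge.py | convert_team_to_showdown_format
-- ===== SOURCE A (Python) =====
-- def convert_team_to_showdown_format(team_text):
--     """
--     Convert our simple team format to Showdown's text export format.
--
--     Our format:           Showdown export format:
--         Gengar                Gengar
--         - thunderbolt         - Thunderbolt
--         - icebeam             - Ice Beam
--         - hypnosis            - Hypnosis
--         - dreameater          - Dream Eater
--                                                     ← blank line between Pokemon
--         Exeggutor             Exeggutor
--         - psychic             - Psychic
--         ...                   ...
--
--     The KEY requirement is blank lines between Pokemon blocks.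
--     poke-env uses these to split the team into individual Pokemon.
--     Without them, all moves get concatenated into one Pokemon.
--     """
--     blocks = []
--     current_block = []
--
--     for line in team_text.strip().split('\n'):
--         stripped = line.strip()
--
--         if not stripped:
--             # Blank line = end of current Pokemon block
--             if current_block:
--                 blocks.append('\n'.join(current_block))
--                 current_block = []
--             continue
--
--         if stripped.startswith('-'):
--             # Move line
--             current_block.append(stripped)
--         else:
--             # Pokemon name — if we already have a block building, close it
--             if current_block:
--                 blocks.append('\n'.join(current_block))
--                 current_block = []
--             current_block.append(stripped)
--
--     # Don't forget the last block
--     if current_block: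
--         blocks.append('\n'.join(current_block))
--
--     # Join with double newlines — this is what poke-env needs
--     result = '\n\n'.join(blocks)
--     return result
-- ===== SOURCE B (Python) =====
-- def _take_while(pred, xs):
--     out = []
--     for x in xs:
--         if not pred(x):
--             break
--         out.append(x)
--     return out
--
--
-- def _split_blank(lines):
--     # chunks of consecutive non-blank lines (blank separators dropped)
--     chunks = []
--     while lines:
--         chunk = _take_while(lambda s: s != '', lines)
--         chunks.append(chunk)
--         lines = lines[len(chunk) + 1:]
--     return chunks
--
--
-- def _regroup(chunk):
--     # leading move lines form their own group; then each name line starts a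
--     # group that absorbs the move lines following it
--     dashes = _take_while(lambda s: s.startswith('-'), chunk)
--     rest = chunk[len(dashes):]
--     groups = [dashes] if dashes else []
--     while rest:
--         moves = _take_while(lambda s: s.startswith('-'), rest[1:])
--         groups.append([rest[0]] + moves)
--         rest = rest[1 + len(moves):]
--     return groups
--
--
-- def convert_team_to_showdown_format(team_text):
--     lines = [l.strip() for l in team_text.strip().split('\n')]
--     groups = [g for c in _split_blank(lines) for g in _regroup(c)]
--     return '\n\n'.join('\n'.join(g) for g in groups)
-- ===== Notes on version B (the rewrite author's own statement) =====
-- stated objective: alternative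
-- what changed: Replaces A's single stateful blocks/current-block accumulator loop with a two-pass decomposition: first split the stripped lines on blank lines into chunks, then regroup each chunk into a leading move-only group plus one group per name line with its following move lines.
import Mathlib
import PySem

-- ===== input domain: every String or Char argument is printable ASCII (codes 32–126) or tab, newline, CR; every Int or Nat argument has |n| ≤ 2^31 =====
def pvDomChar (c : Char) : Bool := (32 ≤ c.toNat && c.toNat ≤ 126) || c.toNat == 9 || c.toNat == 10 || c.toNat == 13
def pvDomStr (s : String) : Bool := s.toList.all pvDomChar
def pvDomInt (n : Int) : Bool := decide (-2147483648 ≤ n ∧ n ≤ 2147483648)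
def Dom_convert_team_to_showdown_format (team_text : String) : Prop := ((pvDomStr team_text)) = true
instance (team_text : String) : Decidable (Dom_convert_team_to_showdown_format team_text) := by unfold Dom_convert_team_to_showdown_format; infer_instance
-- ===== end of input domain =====

-- B replaces A's single stateful blocks/current-block accumulator by a two-pass
-- split-on-blank-lines-then-regroup decomposition (objective: alternative, same cost).

-- ===== PORT A =====
-- loop body of A's for-loop: state = (blocks, current_block)
def pvStepA (acc : List String × List String) (line : String) : List String × List String :=
  let stripped := PySem.Str.strip line
  if stripped = "" then
    if acc.2 = [] then acc else (acc.1 ++ [PySem.Str.join "\n" acc.2], [])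
  else if PySem.Str.startswith stripped "-" then
    (acc.1, acc.2 ++ [stripped])
  else
    if acc.2 = [] then (acc.1, acc.2 ++ [stripped])
    else (acc.1 ++ [PySem.Str.join "\n" acc.2], [stripped])

def convert_team_to_showdown_format (team_text : String) : String :=
  let st := ((PySem.Str.split? (PySem.Str.strip team_text) "\n").getD []).foldl pvStepA ([], [])
  let blocks := if st.2 = [] then st.1 else st.1 ++ [PySem.Str.join "\n" st.2]
  PySem.Str.join "\n\n" blocks

-- ===== PORT B =====
-- split the (already stripped) lines on blank lines into chunks of consecutive non-blank lines
def pvSplitBlank : List String → List (List String)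
  | [] => []
  | x :: r =>
    let chunk := (x :: r).takeWhile (fun s => s != "")
    chunk :: pvSplitBlank ((x :: r).drop (chunk.length + 1))
termination_by l => l.length
decreasing_by simp

-- each name line starts a group that absorbs the move lines following it
def pvRegroupRest : List String → List (List String)
  | [] => []
  | x :: r =>
    let moves := r.takeWhile (fun s => PySem.Str.startswith s "-")
    (x :: moves) :: pvRegroupRest (r.drop moves.length)
termination_by l => l.length
decreasing_by simp

-- leading move lines of a chunk form their own group
def pvRegroup (chunk : List String) : List (List String) :=
  let dashes := chunk.takeWhile (fun s => PySem.Str.startswith s "-")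
  let rest := chunk.drop dashes.length
  (if dashes = [] then [] else [dashes]) ++ pvRegroupRest rest

def convert_team_to_showdown_format_alt (team_text : String) : String :=
  let lines := ((PySem.Str.split? (PySem.Str.strip team_text) "\n").getD []).map PySem.Str.strip
  let groups := (pvSplitBlank lines).flatMap pvRegroup
  PySem.Str.join "\n\n" (groups.map (PySem.Str.join "\n"))

-- ===== PRECONDITION & SPEC =====
def Spec_convert_team_to_showdown_format (team_text : String) (out : String) : Prop := out = convert_team_to_showdown_format_alt team_text
instance (team_text : String) (out : String) : Decidable (Spec_convert_team_to_showdown_format team_text out) := by unfold Spec_convert_team_to_showdown_format; infer_instance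

-- ===== CLAIM (what is proved, stated in full; the proofs are below) =====
def Claim_equal_convert_team_to_showdown_format : Prop := ∀ (team_text : String), Dom_convert_team_to_showdown_format team_text → Spec_convert_team_to_showdown_format team_text (convert_team_to_showdown_format team_text)

-- ===== LEMMAS AND PROOFS =====

-- reference accumulator over already-stripped lines: pvE current lines = list of blocks still to come
def pvE : List String → List String → List (List String)
  | cur, [] => if cur = [] then [] else [cur]
  | cur, x :: r =>
    if x = "" then (if cur = [] then [] else [cur]) ++ pvE [] r
    else if PySem.Str.startswith x "-" then pvE (cur ++ [x]) r
    else (if cur = [] then [] else [cur]) ++ pvE [x] r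
termination_by _ l => l.length

theorem pv_dash_ne_empty {x : String} (h : PySem.Str.startswith x "-" = true) : ¬ x = "" := by
  intro he; subst he; simp [PySem.Str.startswith, PySem.Chars.startswith] at h

theorem pv_drop_takeWhile {p : String → Bool} (l : List String) :
    l.drop (l.takeWhile p).length = l.dropWhile p := by
  induction l with
  | nil => rfl
  | cons x r ih => by_cases h : p x <;> simp [h, ih]

theorem pv_dropWhile_head_false {p : String → Bool} {l : List String} {y : String} {r : List String}
    (h : l.dropWhile p = y :: r) : p y = false := by
  have hne : l.dropWhile p ≠ [] := by simp [h]
  have := List.head_dropWhile_not p hne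
  simpa [h] using this

-- A's loop equals pvE (with the final close folded in)
theorem pv_loopA (lines : List String) (blocks cur : List String) :
    (let st := lines.foldl pvStepA (blocks, cur);
     if st.2 = [] then st.1 else st.1 ++ [PySem.Str.join "\n" st.2])
    = blocks ++ (pvE cur (lines.map PySem.Str.strip)).map (PySem.Str.join "\n") := by
  induction lines generalizing blocks cur with
  | nil => simp only [List.foldl_nil, List.map_nil, pvE]; split_ifs with h <;> simp [h]
  | cons l rest ih =>
    simp only [List.foldl_cons, List.map_cons, pvE, pvStepA]
    by_cases h0 : PySem.Str.strip l = ""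
    · by_cases hc : cur = [] <;> simp [h0, hc, ih, List.append_assoc]
    · by_cases hd : PySem.Str.startswith (PySem.Str.strip l) "-"
      · simp only [PySem.Str.startswith_eq, PySem.Str.toList_strip,
          show "-".toList = ['-'] from rfl] at hd
        simp [h0, hd, ih]
      · simp only [PySem.Str.startswith_eq, PySem.Str.toList_strip,
          show "-".toList = ['-'] from rfl] at hd
        by_cases hc : cur = [] <;> simp [h0, hd, hc, ih, List.append_assoc]

-- absorbing a run of dash lines into a non-empty current block
theorem pv_absorb (ds : List String) (hds : ∀ x ∈ ds, PySem.Str.startswith x "-" = true)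
    (cur : List String) (hcur : cur ≠ []) (r : List String) :
    pvE cur (ds ++ r) = pvE (cur ++ ds) r := by
  induction ds generalizing cur with
  | nil => simp
  | cons d ds ih =>
    have hd : PySem.Str.startswith d "-" = true := hds d (by simp)
    have hd' : PySem.Chars.startswith d.toList ['-'] = true := by simpa using hd
    have hne := pv_dash_ne_empty hd
    rw [show (d :: ds) ++ r = d :: (ds ++ r) from rfl]
    rw [show pvE cur (d :: (ds ++ r)) = pvE (cur ++ [d]) (ds ++ r) from by
      simp only [pvE]; simp [hne, hd']]
    rw [ih (fun x hx => hds x (by simp [hx])) (cur ++ [d]) (by simp)]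
    simp

-- processing a blank-free run that starts with a name line (or is empty),
-- with a non-empty current block and a remainder that is empty or starts blank
theorem pv_names (m : List String) (hm : ∀ x ∈ m, x ≠ "")
    (hh : ∀ y r', m = y :: r' → PySem.Str.startswith y "-" = false)
    (cur : List String) (hcur : cur ≠ [])
    (rest : List String) (hrest : rest = [] ∨ ∃ r', rest = "" :: r') :
    pvE cur (m ++ rest) = cur :: (pvRegroupRest m ++ pvE [] (rest.drop 1)) := by
  induction m using pvRegroupRest.induct generalizing cur with
  | case1 =>
    rcases hrest with h | ⟨r', h⟩ <;> subst h <;> simp [pvE, hcur, pvRegroupRest]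
  | case2 x r moves ih =>
    have hx : x ≠ "" := hm x (by simp)
    have hxd : PySem.Str.startswith x "-" = false := hh x r rfl
    have hxd' : PySem.Chars.startswith x.toList ['-'] = false := by simpa using hxd
    rw [show (x :: r) ++ rest = x :: (r ++ rest) from rfl]
    rw [show pvE cur (x :: (r ++ rest)) = (if cur = [] then [] else [cur]) ++ pvE [x] (r ++ rest) from by
      simp only [pvE]; simp [hx, hxd']]
    have hr : r = moves ++ r.dropWhile (fun s => PySem.Str.startswith s "-") := by
      simpa [moves] using (List.takeWhile_append_dropWhile (p := fun s => PySem.Str.startswith s "-") (l := r)).symm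
    have hmoves : ∀ y ∈ moves, PySem.Str.startswith y "-" = true := by
      intro y hy; exact List.mem_takeWhile_imp (p := fun s => PySem.Str.startswith s "-") hy
    rw [show pvE [x] (r ++ rest) = pvE [x] (moves ++ (r.dropWhile (fun s => PySem.Str.startswith s "-") ++ rest)) by
        rw [← List.append_assoc, ← hr]]
    rw [pv_absorb moves hmoves [x] (by simp) _]
    have hdw_mem : ∀ y ∈ r.dropWhile (fun s => PySem.Str.startswith s "-"), y ≠ "" := by
      intro y hy; exact hm y (by simp [(List.dropWhile_sublist _).mem hy])
    have hdw_head : ∀ y r', r.dropWhile (fun s => PySem.Str.startswith s "-") = y :: r' →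
        PySem.Str.startswith y "-" = false := by
      intro y r' h; exact pv_dropWhile_head_false (p := fun s => PySem.Str.startswith s "-") h
    rw [show r.drop moves.length = r.dropWhile (fun s => PySem.Str.startswith s "-") by
        simpa [moves] using pv_drop_takeWhile (p := fun s => PySem.Str.startswith s "-") r] at ih
    rw [List.singleton_append]
    rw [ih hdw_mem hdw_head (x :: moves) (by simp)]
    simp only [pvRegroupRest, hcur, if_false]
    rw [show r.drop moves.length = r.dropWhile (fun s => PySem.Str.startswith s "-") by
        simpa [moves] using pv_drop_takeWhile (p := fun s => PySem.Str.startswith s "-") r]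
    have hfun : (fun s => PySem.Str.startswith s "-") = (fun s : String => PySem.Chars.startswith s.toList ['-']) := by
      funext s; simp
    simp [hcur, moves, hfun]

-- one whole chunk (non-empty, blank-free) followed by an empty-or-blank-headed remainder
theorem pv_chunk (c : List String) (hc : c ≠ []) (hm : ∀ x ∈ c, x ≠ "")
    (rest : List String) (hrest : rest = [] ∨ ∃ r', rest = "" :: r') :
    pvE [] (c ++ rest) = pvRegroup c ++ pvE [] (rest.drop 1) := by
  obtain ⟨x, c', rfl⟩ := List.exists_cons_of_ne_nil hc
  have hx : x ≠ "" := hm x (by simp)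
  have hstep : pvE [] ((x :: c') ++ rest) = pvE [x] (c' ++ rest) := by
    rw [show (x :: c') ++ rest = x :: (c' ++ rest) from rfl]
    by_cases hxd : PySem.Chars.startswith x.toList ['-'] = true <;>
      · simp only [pvE]; simp [hx, hxd]
  rw [hstep]
  have hr : c' = c'.takeWhile (fun s => PySem.Str.startswith s "-") ++ c'.dropWhile (fun s => PySem.Str.startswith s "-") :=
    (List.takeWhile_append_dropWhile).symm
  rw [show pvE [x] (c' ++ rest) = pvE [x] ((c'.takeWhile (fun s => PySem.Str.startswith s "-")) ++ (c'.dropWhile (fun s => PySem.Str.startswith s "-") ++ rest)) by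
      rw [← List.append_assoc, ← hr]]
  rw [pv_absorb _ (fun y hy => List.mem_takeWhile_imp (p := fun s => PySem.Str.startswith s "-") hy) [x] (by simp) _]
  rw [pv_names _ (fun y hy => hm y (by simp [(List.dropWhile_sublist _).mem hy]))
      (fun y r' h => pv_dropWhile_head_false (p := fun s => PySem.Str.startswith s "-") h) _ (by simp) rest hrest]
  by_cases hxd : PySem.Str.startswith x "-"
  · simp only [pvRegroup, List.takeWhile_cons, hxd, if_true]
    simp only [List.length_cons, List.drop_succ_cons, pv_drop_takeWhile]
    simp
  · simp only [pvRegroup, List.takeWhile_cons, hxd]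
    simp [pvRegroupRest, pv_drop_takeWhile]

-- B's two-pass grouping equals the reference accumulator started empty
theorem pv_E_eq_B (l : List String) : pvE [] l = (pvSplitBlank l).flatMap pvRegroup := by
  induction l using pvSplitBlank.induct with
  | case1 => simp [pvE, pvSplitBlank]
  | case2 x r chunk ih =>
    by_cases hx : x = ""
    · subst hx
      have hchunk : chunk = [] := by simp [chunk]
      rw [show pvSplitBlank ("" :: r) = chunk :: pvSplitBlank (("" :: r).drop (chunk.length + 1)) from by
        rw [pvSplitBlank]]
      simp only [hchunk, List.length_nil, List.drop_succ_cons, List.drop_zero] at *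
      simp [pvE, ih, pvRegroup, pvRegroupRest]
    · have hchunk : chunk = x :: r.takeWhile (fun s => s != "") := by simp [chunk, hx]
      have hcl : (x :: r) = chunk ++ (x :: r).dropWhile (fun s => s != "") := by
        conv_lhs => rw [← List.takeWhile_append_dropWhile (p := fun s => s != "") (l := x :: r)]
      have hrest : (x :: r).dropWhile (fun s => s != "") = [] ∨
          ∃ r', (x :: r).dropWhile (fun s => s != "") = "" :: r' := by
        rcases h : (x :: r).dropWhile (fun s => s != "") with _ | ⟨y, r'⟩
        · exact Or.inl rfl
        · right; refine ⟨r', ?_⟩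
          have := pv_dropWhile_head_false h
          simp at this; simp [this]
      have hdrop : (x :: r).drop (chunk.length + 1) = ((x :: r).dropWhile (fun s => s != "")).drop 1 := by
        rw [show chunk = (x :: r).takeWhile (fun s => s != "") from rfl]
        rw [← pv_drop_takeWhile (p := fun s => s != "") (x :: r), List.drop_drop]
      rw [show pvSplitBlank (x :: r) = chunk :: pvSplitBlank ((x :: r).drop (chunk.length + 1)) from by
        rw [pvSplitBlank]]
      conv_lhs => rw [hcl]
      rw [pv_chunk chunk (by simp [hchunk]) ?_ _ hrest]
      · rw [List.flatMap_cons, ← ih, hdrop]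
      · intro y hy
        have : y ∈ (x :: r).takeWhile (fun s => s != "") := by rw [← hchunk] at *; exact hy
        have := List.mem_takeWhile_imp this
        simpa using this

-- ===== VERDICT (by name: the statement is the Claim_ definition above) =====
theorem convert_team_to_showdown_format_spec : Claim_equal_convert_team_to_showdown_format := by
  intro t _
  unfold Spec_convert_team_to_showdown_format
  unfold convert_team_to_showdown_format convert_team_to_showdown_format_alt
  rw [show (((PySem.Str.split? (PySem.Str.strip t) "\n").getD []).foldl pvStepA ([], []) : List String × List String) =
      ((PySem.Str.split? (PySem.Str.strip t) "\n").getD []).foldl pvStepA (([] : List String), ([] : List String)) from rfl]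
  have := pv_loopA ((PySem.Str.split? (PySem.Str.strip t) "\n").getD []) [] []
  simp only [List.nil_append] at this
  simp only [this, pv_E_eq_B]
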